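-- pv_equiv track=rewrite | github.com/DavryH/rag-vectorstore-demo | rag-demo/steps/07-extract-quotes/run_step_07_extract_quotes.py | candidate_supports_intro_milestone
-- ===== SOURCE A (Python) =====
-- from typing import TYPE_CHECKING, Any, Callable, Sequence, TypedDict
--
-- def normalize_quote_text(text: str) -> str:
--     cleaned_lines = [" ".join(line.split()) for line in str(text).splitlines() if line.strip()]
--     return "\n".join(cleaned_lines).strip()
--
-- def get_candidate_lines(candidate: dict[str, Any]) -> list[str]:
--     text = str(candidate.get("text", ""))
--     return [normalize_quote_text(line) for line in text.splitlines() if line.strip()]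
--
-- def candidate_supports_intro_milestone(candidate: dict[str, Any]) -> bool:
--     lines = get_candidate_lines(candidate)
--     text = "\n".join(lines).lower()
--     has_intro_language = any(
--         token in text
--         for token in (
--             "subject: intro",
--             "subject: introduction",
--             "introduced to",
--             "introduction to",
--             "great to meet",
--             "great meeting",
--             "connecting you",
--         )
--     )
--     has_date = any(line.lower().startswith("date:") for line in lines)
--     has_subject = any(line.lower().startswith("subject:") for line in lines)
--     return has_intro_language and (has_date or has_subject)
-- ===== SOURCE B (Python) =====
-- # Different decomposition: build the lowercased normalized blob directly from words
-- # (no normalize_quote_text helper), and detect date:/subject: headers by marker-substring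
-- # search in the blob ("\ndate:" / blob prefix) instead of any per-line startswith scan.
--
-- _TOKENS = (
--     "subject: intro",
--     "subject: introduction",
--     "introduced to",
--     "introduction to",
--     "great to meet",
--     "great meeting",
--     "connecting you",
-- )
--
-- def candidate_supports_intro_milestone(candidate) -> bool:
--     text = "\n".join(
--         " ".join(words)
--         for words in map(str.split, str(candidate.get("text", "")).splitlines())
--         if words
--     ).lower()
--     if not (text.startswith(("date:", "subject:"))
--             or "\ndate:" in text or "\nsubject:" in text):
--         return False
--     return any(tok in text for tok in _TOKENS)
-- ===== Notes on version B (the rewrite author's own statement) =====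
-- stated objective: alternative
-- what changed: B drops the normalize_quote_text helper and all per-line scans: it builds the lowercased normalized blob directly from the word lists (split/join once) and detects date:/subject: header lines by marker-substring search in the blob (prefix 'date:'/'subject:' or substring '\ndate:'/'\nsubject:') instead of A's two any() loops of per-line lower().startswith checks.
import Mathlib
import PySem

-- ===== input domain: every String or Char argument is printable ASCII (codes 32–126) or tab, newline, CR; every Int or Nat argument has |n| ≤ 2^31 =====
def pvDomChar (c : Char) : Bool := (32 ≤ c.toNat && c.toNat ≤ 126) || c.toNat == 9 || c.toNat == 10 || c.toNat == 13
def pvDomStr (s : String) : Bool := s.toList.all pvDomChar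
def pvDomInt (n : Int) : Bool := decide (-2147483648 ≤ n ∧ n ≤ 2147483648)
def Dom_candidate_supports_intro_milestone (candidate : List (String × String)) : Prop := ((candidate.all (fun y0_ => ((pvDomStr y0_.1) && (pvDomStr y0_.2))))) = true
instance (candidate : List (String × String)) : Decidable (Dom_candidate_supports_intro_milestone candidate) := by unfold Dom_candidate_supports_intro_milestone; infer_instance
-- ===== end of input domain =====

-- B drops the normalize_quote_text helper and all per-line scans: it builds the lowercased
-- normalized blob straight from the word lists and finds date:/subject: header lines by
-- marker-substring search in the blob instead of per-line startswith loops (objective: alternative).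

-- ===== PORT A =====
def pvNormalizeQuoteText (text : String) : String :=
  let cleaned := ((PySem.Str.splitlines text).filter
      (fun line => PySem.Str.strip line != "")).map
      (fun line => PySem.Str.join " " (PySem.Str.split₀ line))
  PySem.Str.strip (PySem.Str.join "\n" cleaned)

def pvGetCandidateLines (candidate : List (String × String)) : List String :=
  let text := (PySem.Dict.mk candidate).getD "text" ""
  ((PySem.Str.splitlines text).filter (fun line => PySem.Str.strip line != "")).map
    pvNormalizeQuoteText

def pvIntroTokens : List String :=
  ["subject: intro", "subject: introduction", "introduced to", "introduction to",
   "great to meet", "great meeting", "connecting you"]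

def candidate_supports_intro_milestone (candidate : List (String × String)) : Bool :=
  let lines := pvGetCandidateLines candidate
  let text := PySem.Str.lower (PySem.Str.join "\n" lines)
  let hasIntro := pvIntroTokens.any (fun tok => PySem.Str.isIn tok text)
  let hasDate := lines.any (fun line => PySem.Str.startswith (PySem.Str.lower line) "date:")
  let hasSubject := lines.any (fun line => PySem.Str.startswith (PySem.Str.lower line) "subject:")
  hasIntro && (hasDate || hasSubject)

-- ===== PORT B =====
-- B: lowercased normalized blob built straight from the word lists; header lines detected by
-- blob-prefix / "\n"-marker substring tests; early False before the token scan.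
def candidate_supports_intro_milestone_alt (candidate : List (String × String)) : Bool :=
  let text := PySem.Str.lower (PySem.Str.join "\n"
      ((((PySem.Str.splitlines ((PySem.Dict.mk candidate).getD "text" "")).map
          PySem.Str.split₀).filter (fun ws => !ws.isEmpty)).map
        (fun ws => PySem.Str.join " " ws)))
  if !(PySem.Str.startswith text "date:" || PySem.Str.startswith text "subject:" ||
       PySem.Str.isIn "\ndate:" text || PySem.Str.isIn "\nsubject:" text) then false
  else pvIntroTokens.any (fun tok => PySem.Str.isIn tok text)

-- ===== PRECONDITION & SPEC =====
def Spec_candidate_supports_intro_milestone (candidate : List (String × String)) (out : Bool) : Prop := out = candidate_supports_intro_milestone_alt candidate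
instance (candidate : List (String × String)) (out : Bool) : Decidable (Spec_candidate_supports_intro_milestone candidate out) := by unfold Spec_candidate_supports_intro_milestone; infer_instance

-- ===== CLAIM (what is proved, stated in full; the proofs are below) =====
def Claim_equal_candidate_supports_intro_milestone : Prop := ∀ (candidate : List (String × String)), Dom_candidate_supports_intro_milestone candidate → Spec_candidate_supports_intro_milestone candidate (candidate_supports_intro_milestone candidate)

-- ===== LEMMAS AND PROOFS =====

-- equation lemmas for the split₀/splitlines worker loops
lemma pv_sp0_nil (cur acc) : PySem.Chars.split₀.go [] cur acc =
    if cur.isEmpty then acc.reverse else (cur.reverse :: acc).reverse := by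
  rw [PySem.Chars.split₀.go.eq_def]

lemma pv_sp0_cons (c rest cur acc) : PySem.Chars.split₀.go (c :: rest) cur acc =
    if PySem.Chars.isspace c then
      (if cur.isEmpty then PySem.Chars.split₀.go rest [] acc
       else PySem.Chars.split₀.go rest [] (cur.reverse :: acc))
    else PySem.Chars.split₀.go rest (c :: cur) acc := by
  rw [PySem.Chars.split₀.go.eq_def]

lemma pv_sl_nil (isB cur acc) : PySem.Chars.splitlines.go isB [] cur acc =
    if cur.isEmpty then acc.reverse else (cur.reverse :: acc).reverse := by
  rw [PySem.Chars.splitlines.go.eq_def]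

lemma pv_sl_rn (isB rest cur acc) : PySem.Chars.splitlines.go isB ('\r' :: '\n' :: rest) cur acc =
    PySem.Chars.splitlines.go isB rest [] (cur.reverse :: acc) := by
  rw [PySem.Chars.splitlines.go.eq_def]
  split
  · rename_i heq; cases heq
  · rename_i r2 heq
    injection heq with h1 h2
    injection h2 with h3 h4
    rw [h4]
  · rename_i c' rest' hno heq
    injection heq with h1 h2
    exact absurd (hno rest h1.symm h2.symm) (by simp)

lemma pv_sl_cons (isB c rest cur acc) (h : c ≠ '\r' ∨ rest.head? ≠ some '\n') :
    PySem.Chars.splitlines.go isB (c :: rest) cur acc =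
    if isB c then PySem.Chars.splitlines.go isB rest [] (cur.reverse :: acc)
    else PySem.Chars.splitlines.go isB rest (c :: cur) acc := by
  rw [PySem.Chars.splitlines.go.eq_def]
  split
  · rename_i heq; cases heq
  · rename_i r2 heq
    injection heq with h1 h2
    rcases h with h | h
    · exact absurd h1 h
    · rw [h2] at h; simp at h
  · rename_i c' rest' hno heq
    injection heq with h1 h2
    rw [h1, h2]

-- the break-character test of PySem.Chars.splitlines, as a named function
def pvBreak (c : Char) : Bool :=
  have n := c.toNat
  decide (n = 10) || decide (n = 13) || decide (n = 11) || decide (n = 12) || decide (n = 28) ||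
    decide (n = 29) || decide (n = 30) || decide (n = 133) || decide (n = 8232) || decide (n = 8233)

lemma pv_splitlines_eq (s : List Char) :
    PySem.Chars.splitlines s = PySem.Chars.splitlines.go pvBreak s [] [] := rfl

-- words produced by split₀ are nonempty and whitespace-free
lemma pv_split0_go_pieces : ∀ (s cur acc : _), (∀ c ∈ cur, PySem.Chars.isspace c = false) →
    (∀ p ∈ acc, p ≠ [] ∧ ∀ c ∈ p, PySem.Chars.isspace c = false) →
    ∀ p ∈ PySem.Chars.split₀.go s cur acc, p ≠ [] ∧ ∀ c ∈ p, PySem.Chars.isspace c = false := by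
  intro s
  induction s with
  | nil =>
    intro cur acc hcur hacc p hp
    rw [pv_sp0_nil] at hp
    split at hp
    · exact hacc p (by simpa using hp)
    · rename_i hne
      simp only [List.reverse_cons, List.mem_append, List.mem_reverse,
        List.mem_singleton] at hp
      rcases hp with h | h
      · exact hacc p h
      · subst h
        exact ⟨by simpa [List.isEmpty_iff] using hne, fun c hc => hcur c (by simpa using hc)⟩
  | cons c rest ih =>
    intro cur acc hcur hacc p hp
    rw [pv_sp0_cons] at hp
    split at hp
    · split at hp
      · exact ih [] acc (by simp) hacc p hp
      · rename_i hsp hne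
        refine ih [] _ (by simp) ?_ p hp
        intro q hq
        rcases List.mem_cons.mp hq with h | h
        · subst h
          exact ⟨by simpa [List.isEmpty_iff] using hne, fun d hd => hcur d (by simpa using hd)⟩
        · exact hacc q h
    · rename_i hsp
      refine ih (c :: cur) acc ?_ hacc p hp
      intro d hd
      rcases List.mem_cons.mp hd with h | h
      · subst h; simpa using hsp
      · exact hcur d h

lemma pv_mem_split0 (s : List Char) :
    ∀ p ∈ PySem.Chars.split₀ s, p ≠ [] ∧ ∀ c ∈ p, PySem.Chars.isspace c = false := by
  intro p hp
  exact pv_split0_go_pieces s [] [] (by simp) (by simp) p hp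

-- split₀ of an all-whitespace string is empty, and conversely
lemma pv_split0_go_allspace : ∀ (s : List Char), (∀ c ∈ s, PySem.Chars.isspace c = true) →
    ∀ acc, PySem.Chars.split₀.go s [] acc = acc.reverse := by
  intro s
  induction s with
  | nil => intro _ acc; rw [pv_sp0_nil]; simp
  | cons c rest ih =>
    intro hs acc
    rw [pv_sp0_cons]
    rw [if_pos (hs c (by simp)), if_pos (by simp)]
    exact ih (fun d hd => hs d (by simp [hd])) acc

lemma pv_split0_go_ne : ∀ (s cur acc : _),
    ((∃ c ∈ s, PySem.Chars.isspace c = false) ∨ cur ≠ [] ∨ acc ≠ []) →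
    PySem.Chars.split₀.go s cur acc ≠ [] := by
  intro s
  induction s with
  | nil =>
    intro cur acc h
    rw [pv_sp0_nil]
    rcases h with ⟨c, hc, _⟩ | h | h
    · exact absurd hc (by simp)
    · rw [if_neg (by simpa [List.isEmpty_iff] using h)]
      simp
    · cases hc2 : cur.isEmpty
      · rw [if_neg (by simp [hc2])]
        simp
      · rw [if_pos (by simp [hc2])]
        simp [h]
  | cons c rest ih =>
    intro cur acc h
    rw [pv_sp0_cons]
    split
    · rename_i hsp
      split
      · rename_i hcur
        apply ih [] acc
        rcases h with ⟨d, hd, hds⟩ | hc | ha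
        · rcases List.mem_cons.mp hd with rfl | hd'
          · exact absurd hsp (by simp [hds])
          · exact Or.inl ⟨d, hd', hds⟩
        · exact absurd (List.isEmpty_iff.mp hcur) hc
        · exact Or.inr (Or.inr ha)
      · exact ih [] _ (Or.inr (Or.inr (by simp)))
    · exact ih (c :: cur) acc (Or.inr (Or.inl (by simp)))

lemma pv_split0_eq_nil_iff (s : List Char) :
    PySem.Chars.split₀ s = [] ↔ ∀ c ∈ s, PySem.Chars.isspace c = true := by
  constructor
  · intro h
    by_contra hc
    push_neg at hc
    obtain ⟨c, hcs, hcsp⟩ := hc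
    exact pv_split0_go_ne s [] [] (Or.inl ⟨c, hcs, by simpa using hcsp⟩) h
  · intro h
    simpa using pv_split0_go_allspace s h []

-- strip of an all-whitespace string is empty, and conversely
lemma pv_strip_eq_nil_iff (s : List Char) :
    PySem.Chars.strip s = [] ↔ ∀ c ∈ s, PySem.Chars.isspace c = true := by
  unfold PySem.Chars.strip PySem.Chars.rstrip PySem.Chars.lstrip
  rw [List.reverse_eq_nil_iff, List.dropWhile_eq_nil_iff]
  constructor
  · intro h c hc
    by_cases hin : c ∈ s.dropWhile PySem.Chars.isspace
    · exact h c (by simpa using hin)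
    · have hsplit := List.takeWhile_append_dropWhile (p := PySem.Chars.isspace) (l := s)
      have hmem : c ∈ s.takeWhile PySem.Chars.isspace ++ s.dropWhile PySem.Chars.isspace := by
        rw [hsplit]; exact hc
      rcases List.mem_append.mp hmem with h1 | h1
      · exact List.mem_takeWhile_imp h1
      · exact absurd h1 hin
  · intro h c hc
    exact h c ((List.dropWhile_sublist _).mem (by simpa using hc))

-- run of splitlines.go over a break-free string
lemma pv_splitlines_goNB (isB : Char → Bool) (hB : isB '\r' = true) :
    ∀ (s cur acc : _), (∀ c ∈ s, isB c = false) →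
    PySem.Chars.splitlines.go isB s cur acc =
      if (cur.reverse ++ s).isEmpty then acc.reverse else acc.reverse ++ [cur.reverse ++ s] := by
  intro s
  induction s with
  | nil =>
    intro cur acc _
    rw [pv_sl_nil]
    rcases cur with _ | ⟨c, cs⟩ <;> simp
  | cons c rest ih =>
    intro cur acc hs
    have hc : isB c = false := hs c (by simp)
    have hcr : c ≠ '\r' := by
      intro h; rw [h, hB] at hc; cases hc
    rw [pv_sl_cons isB c rest cur acc (Or.inl hcr), if_neg (by simp [hc]),
      ih (c :: cur) acc (fun d hd => hs d (by simp [hd]))]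
    have h2 : (c :: cur).reverse ++ rest = cur.reverse ++ c :: rest := by simp
    rw [h2]

-- every piece produced by splitlines.go is break-free
lemma pv_sl_base (isB : Char → Bool) (cur acc) (hcur : ∀ c ∈ cur, isB c = false)
    (hacc : ∀ p ∈ acc, ∀ c ∈ p, isB c = false) :
    ∀ p ∈ PySem.Chars.splitlines.go isB [] cur acc, ∀ c ∈ p, isB c = false := by
  intro p hp
  rw [pv_sl_nil] at hp
  split at hp
  · exact hacc p (by simpa using hp)
  · simp only [List.reverse_cons, List.mem_append, List.mem_reverse,
      List.mem_singleton] at hp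
    rcases hp with h | h
    · exact hacc p h
    · subst h
      intro c hc
      exact hcur c (by simpa using hc)

lemma pv_splitlines_go_pieces (isB : Char → Bool) :
    ∀ (n : Nat) (s cur acc : _), s.length ≤ n → (∀ c ∈ cur, isB c = false) →
    (∀ p ∈ acc, ∀ c ∈ p, isB c = false) →
    ∀ p ∈ PySem.Chars.splitlines.go isB s cur acc, ∀ c ∈ p, isB c = false := by
  intro n
  induction n with
  | zero =>
    intro s cur acc hl hcur hacc
    have hs : s = [] := List.eq_nil_of_length_eq_zero (Nat.le_zero.mp hl)
    subst hs
    exact pv_sl_base isB cur acc hcur hacc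
  | succ n ih =>
    intro s cur acc hl hcur hacc
    rcases s with _ | ⟨c, rest⟩
    · exact pv_sl_base isB cur acc hcur hacc
    · by_cases hrn : c = '\r' ∧ rest.head? = some '\n'
      · obtain ⟨rfl, hh⟩ := hrn
        rcases rest with _ | ⟨d, rest2⟩
        · simp at hh
        · have hd : d = '\n' := by simpa using hh
          subst hd
          rw [pv_sl_rn]
          refine ih rest2 [] (cur.reverse :: acc) (by simp at hl ⊢; omega) (by simp) ?_
          intro p hp
          rcases List.mem_cons.mp hp with h | h
          · subst h; intro c hc; exact hcur c (by simpa using hc)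
          · exact hacc p h
      · have h' : c ≠ '\r' ∨ rest.head? ≠ some '\n' := by tauto
        rw [pv_sl_cons isB c rest cur acc h']
        split
        · refine ih rest [] (cur.reverse :: acc) (by simp at hl ⊢; omega) (by simp) ?_
          intro p hp
          rcases List.mem_cons.mp hp with h | h
          · subst h; intro d hd; exact hcur d (by simpa using hd)
          · exact hacc p h
        · rename_i hc
          refine ih rest (c :: cur) acc (by simp at hl ⊢; omega) ?_ hacc
          intro d hd
          rcases List.mem_cons.mp hd with h | h
          · subst h; exact Bool.not_eq_true _ ▸ (by simpa using hc)
          · exact hcur d h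

lemma pv_mem_splitlines (s : List Char) :
    ∀ p ∈ PySem.Chars.splitlines s, ∀ c ∈ p, pvBreak c = false := by
  intro p hp
  rw [pv_splitlines_eq] at hp
  exact pv_splitlines_go_pieces pvBreak s.length s [] [] le_rfl (by simp) (by simp) p hp

lemma pv_splitlines_noBreak (s : List Char) (h : ∀ c ∈ s, pvBreak c = false) :
    PySem.Chars.splitlines s = if s.isEmpty then [] else [s] := by
  rw [pv_splitlines_eq, pv_splitlines_goNB pvBreak (by decide) s [] [] h]
  simp

-- strip is the identity when first and last characters are not whitespace
lemma pv_strip_eq_self (x : List Char)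
    (hh : ∀ c, x.head? = some c → PySem.Chars.isspace c = false)
    (hl : ∀ c, x.getLast? = some c → PySem.Chars.isspace c = false) :
    PySem.Chars.strip x = x := by
  unfold PySem.Chars.strip PySem.Chars.rstrip PySem.Chars.lstrip
  have h1 : x.dropWhile PySem.Chars.isspace = x := by
    rw [List.dropWhile_eq_self_iff]
    intro hlen
    have hne : x ≠ [] := List.ne_nil_of_length_pos hlen
    have hhd := hh (x.head hne) (List.head?_eq_head hne)
    have hx0 : x[0] = x.head hne := (List.head_eq_getElem hne).symm
    rw [hx0]
    simp [hhd]
  rw [h1]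
  have h2 : x.reverse.dropWhile PySem.Chars.isspace = x.reverse := by
    rw [List.dropWhile_eq_self_iff]
    intro hlen
    have hne : x.reverse ≠ [] := List.ne_nil_of_length_pos hlen
    have hx0 : x.reverse[0] = x.reverse.head hne := (List.head_eq_getElem hne).symm
    rw [hx0]
    simp only [List.head_reverse]
    have hgl : x.getLast? = some (x.getLast (by simpa using hne)) := by
      rw [← List.head?_reverse, List.head?_eq_head hne, List.head_reverse]
    simp [hl _ hgl]
  rw [h2, List.reverse_reverse]

-- membership in a single-character join
lemma pv_mem_join (sep : Char) : ∀ (L : List (List Char)) (c : Char),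
    c ∈ PySem.Chars.join [sep] L → c = sep ∨ ∃ w ∈ L, c ∈ w := by
  intro L
  induction L with
  | nil => intro c h; rw [PySem.Chars.join_nil] at h; cases h
  | cons x t ih =>
    intro c h
    cases t with
    | nil =>
      rw [PySem.Chars.join_singleton] at h
      exact Or.inr ⟨x, by simp, h⟩
    | cons y t' =>
      rw [PySem.Chars.join_cons_cons] at h
      rcases List.mem_append.mp h with h1 | h1
      · rcases List.mem_append.mp h1 with h2 | h2
        · exact Or.inr ⟨x, by simp, h2⟩
        · exact Or.inl (by simpa using h2)
      · rcases ih c h1 with h2 | ⟨w, hw, hcw⟩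
        · exact Or.inl h2
        · exact Or.inr ⟨w, by simp [hw], hcw⟩

-- first word heads the join
lemma pv_join_head (w : List Char) (t : List (List Char)) :
    ∃ u, PySem.Chars.join [' '] (w :: t) = w ++ u := by
  cases t with
  | nil => exact ⟨[], by rw [PySem.Chars.join_singleton, List.append_nil]⟩
  | cons y t' => exact ⟨[' '] ++ PySem.Chars.join [' '] (y :: t'),
      by rw [PySem.Chars.join_cons_cons, List.append_assoc]⟩

-- last word ends the join
lemma pv_join_last : ∀ (ws : List (List Char)), (∀ w ∈ ws, w ≠ []) → ws ≠ [] →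
    ∃ w ∈ ws, (PySem.Chars.join [' '] ws).getLast? = w.getLast? := by
  intro ws
  induction ws with
  | nil => intro _ h; exact absurd rfl h
  | cons x t ih =>
    intro hw _
    cases t with
    | nil => exact ⟨x, by simp, by rw [PySem.Chars.join_singleton]⟩
    | cons y t' =>
      obtain ⟨w, hwmem, hwl⟩ := ih (fun v hv => hw v (by simp [hv])) (by simp)
      refine ⟨w, by simp [hwmem], ?_⟩
      rw [PySem.Chars.join_cons_cons, List.append_assoc,
        List.getLast?_append_of_ne_nil]
      · rw [List.getLast?_append_of_ne_nil _ ?_] <;> try exact hwl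
        obtain ⟨u, hu⟩ := pv_join_head y t'
        rw [hu]
        have : y ≠ [] := hw y (by simp)
        rcases y with _ | ⟨a, b⟩
        · exact absurd rfl this
        · simp
      · simp

-- join of nonempty whitespace-free words needs no strip
lemma pv_strip_join_words (ws : List (List Char))
    (h : ∀ w ∈ ws, w ≠ [] ∧ ∀ c ∈ w, PySem.Chars.isspace c = false) :
    PySem.Chars.strip (PySem.Chars.join [' '] ws) = PySem.Chars.join [' '] ws := by
  cases ws with
  | nil => rw [PySem.Chars.join_nil]; rfl
  | cons x t =>
    apply pv_strip_eq_self
    · intro c hc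
      obtain ⟨u, hu⟩ := pv_join_head x t
      rw [hu, List.head?_append_of_ne_nil x (h x (by simp)).1] at hc
      exact (h x (by simp)).2 c (List.mem_of_mem_head? (by simp [hc]))
    · intro c hc
      obtain ⟨w, hwmem, hwl⟩ := pv_join_last (x :: t) (fun v hv => (h v hv).1) (by simp)
      rw [hwl] at hc
      exact (h w hwmem).2 c (List.mem_of_mem_getLast? (by simp [hc]))

-- the A-side filter predicate equals the B-side one
lemma pv_filter_pred (line : String) :
    (PySem.Str.strip line != "") = !(PySem.Str.split₀ line).isEmpty := by
  have hs : PySem.Str.strip line = "" ↔ ∀ c ∈ line.toList, PySem.Chars.isspace c = true := by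
    constructor
    · intro h
      apply (pv_strip_eq_nil_iff _).mp
      rw [← PySem.Str.toList_strip, h]
      simp
    · intro h
      apply String.toList_inj.mp
      rw [PySem.Str.toList_strip, (pv_strip_eq_nil_iff _).mpr h]
      simp
  have h0 : PySem.Str.split₀ line = [] ↔ ∀ c ∈ line.toList, PySem.Chars.isspace c = true := by
    rw [show PySem.Str.split₀ line = List.map String.ofList (PySem.Chars.split₀ line.toList) from rfl,
      List.map_eq_nil_iff, pv_split0_eq_nil_iff]
  rw [Bool.eq_iff_iff]
  simp only [bne_iff_ne, ne_eq, Bool.not_eq_eq_eq_not, Bool.not_true,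
    List.isEmpty_eq_false_iff]
  constructor
  · intro h he
    exact h (hs.mpr (h0.mp he))
  · intro h he
    exact h (h0.mpr (hs.mp he))

-- on a break-free line, normalize_quote_text is just split/join
lemma pv_normalize_eq (line : String) (h : ∀ c ∈ line.toList, pvBreak c = false) :
    pvNormalizeQuoteText line = PySem.Str.join " " (PySem.Str.split₀ line) := by
  unfold pvNormalizeQuoteText
  have hsl : PySem.Str.splitlines line = if line.toList.isEmpty then [] else [line] := by
    rw [show PySem.Str.splitlines line
        = List.map String.ofList (PySem.Chars.splitlines line.toList) from rfl,
      pv_splitlines_noBreak line.toList h]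
    split <;> simp [String.ofList_toList]
  rw [hsl]
  have hwords : List.map String.toList (PySem.Str.split₀ line)
      = PySem.Chars.split₀ line.toList := by
    rw [show PySem.Str.split₀ line = List.map String.ofList (PySem.Chars.split₀ line.toList) from rfl,
      List.map_map,
      show (String.toList ∘ String.ofList) = id from funext (fun x => String.toList_ofList),
      List.map_id]
  by_cases he : line.toList.isEmpty
  · rw [if_pos he]
    have hl0 : line.toList = [] := List.isEmpty_iff.mp he
    have hsp : PySem.Str.split₀ line = [] := by
      have : PySem.Chars.split₀ line.toList = [] :=
        (pv_split0_eq_nil_iff _).mpr (by rw [hl0]; intro c hc; cases hc)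
      rw [show PySem.Str.split₀ line
          = List.map String.ofList (PySem.Chars.split₀ line.toList) from rfl, this]
      rfl
    rw [hsp]
    apply String.toList_inj.mp
    simp [PySem.Str.toList_strip, PySem.Str.toList_join, PySem.Chars.join_nil,
      PySem.Chars.strip, PySem.Chars.rstrip, PySem.Chars.lstrip]
  · rw [if_neg he]
    have hfil : List.filter (fun l => PySem.Str.strip l != "") [line]
        = if !(PySem.Str.split₀ line).isEmpty then [line] else [] := by
      simp only [List.filter, pv_filter_pred]
      cases hb : (!(PySem.Str.split₀ line).isEmpty) <;> simp
    rw [hfil]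
    by_cases hsp : (PySem.Str.split₀ line).isEmpty
    · rw [if_neg (by simp [hsp])]
      have hnil : PySem.Str.split₀ line = [] := List.isEmpty_iff.mp hsp
      rw [hnil]
      apply String.toList_inj.mp
      simp [PySem.Str.toList_strip, PySem.Str.toList_join, PySem.Chars.join_nil,
        PySem.Chars.strip, PySem.Chars.rstrip, PySem.Chars.lstrip]
    · rw [if_pos (by simp [hsp])]
      simp only [List.map_cons, List.map_nil]
      apply String.toList_inj.mp
      rw [PySem.Str.toList_strip, PySem.Str.toList_join]
      simp only [List.map_cons, List.map_nil, PySem.Chars.join_singleton,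
        PySem.Str.toList_join, hwords]
      rw [show (String.toList " ") = [' '] from rfl]
      exact pv_strip_join_words _ (pv_mem_split0 line.toList)

-- lowering a "\n"-joined string lowers each piece (Chars side)
lemma pv_lower_join_chars (l : List (List Char)) :
    PySem.Chars.lower (PySem.Chars.join ['\n'] l) =
      PySem.Chars.join ['\n'] (l.map PySem.Chars.lower) := by
  induction l with
  | nil => rfl
  | cons x r ih =>
    cases r with
    | nil => simp [PySem.Chars.join_singleton, PySem.Chars.lower]
    | cons y t =>
      simp only [PySem.Chars.join_cons_cons, PySem.Chars.lower, List.map_append, List.map_cons] at *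
      simp [ih, PySem.Chars.lowerChar]
      decide

-- lowering never creates a newline
lemma pv_lowerChar_nl (c : Char) (h : PySem.Chars.lowerChar c = '\n') : c = '\n' := by
  unfold PySem.Chars.lowerChar at h
  split at h
  · exfalso
    rename_i hu
    simp only [PySem.Chars.isupper, Bool.and_eq_true, decide_eq_true_eq, Char.le_def] at hu
    obtain ⟨h1, h2⟩ := hu
    rw [UInt32.le_iff_toNat_le] at h1 h2
    have e1 : ('A'.val).toNat = 65 := by decide
    have e2 : ('Z'.val).toNat = 90 := by decide
    have ec : (c.val).toNat = c.toNat := rfl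
    rw [e1, ec] at h1
    rw [e2, ec] at h2
    have hv : Nat.isValidChar (c.toNat + 32) := Or.inl (by omega)
    have h10 := congrArg Char.toNat h
    rw [Char.toNat_ofNat, if_pos hv] at h10
    have e3 : ('\n').toNat = 10 := by decide
    rw [e3] at h10
    omega
  · exact h

lemma pv_lower_noNL (l : List Char) (h : '\n' ∉ l) : '\n' ∉ PySem.Chars.lower l := by
  intro hc
  obtain ⟨c, hcl, hceq⟩ := List.mem_map.mp hc
  exact h (pv_lowerChar_nl c hceq ▸ hcl)

-- a newline-free prefix of (x ++ '\n' :: R) is a prefix of newline-free x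
lemma pv_prefix_append_nl (x R p : List Char) (hx : '\n' ∉ x) (hpn : '\n' ∉ p) :
    p <+: (x ++ '\n' :: R) ↔ p <+: x := by
  constructor
  · intro h
    by_cases hlen : p.length ≤ x.length
    · exact List.prefix_of_prefix_length_le h (List.prefix_append x ('\n' :: R)) hlen
    · exfalso
      have hxp : x <+: p := List.prefix_of_prefix_length_le
        (List.prefix_append x ('\n' :: R)) h (by omega)
      obtain ⟨q, rfl⟩ := hxp
      obtain ⟨t, ht⟩ := h
      rw [List.append_assoc] at ht
      have hq : q ++ t = '\n' :: R := List.append_cancel_left ht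
      rcases q with _ | ⟨a, q'⟩
      · simp at hlen
      · have ha : a = '\n' := by
          have := hq
          simp only [List.cons_append] at this
          injection this
        exact hpn (by simp [ha])
  · intro h
    exact h.trans (List.prefix_append x ('\n' :: R))

-- occurrences of ('\n' :: p) in (x ++ '\n' :: R) with newline-free x
lemma pv_infix_append_nl (x R p : List Char) (hx : '\n' ∉ x) :
    (∃ j, ('\n' :: p) <+: (x ++ '\n' :: R).drop j) ↔
      (p <+: R ∨ ∃ j, ('\n' :: p) <+: R.drop j) := by
  constructor
  · rintro ⟨j, hj⟩
    by_cases hjx : j < x.length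
    · exfalso
      rw [List.drop_append_of_le_length (by omega)] at hj
      have hne : x.drop j ≠ [] := by
        rw [ne_eq, List.drop_eq_nil_iff]; omega
      rcases hd : x.drop j with _ | ⟨a, w⟩
      · exact hne hd
      · rw [hd, List.cons_append] at hj
        have ha : a = '\n' := ((List.cons_prefix_cons).mp hj).1.symm
        exact hx ((List.drop_sublist j x).mem (by simp [hd, ha]))
    · have hk : j = x.length + (j - x.length) := by omega
      rw [hk, List.drop_append, List.drop_eq_nil_iff.mpr (by omega), List.nil_append,
        Nat.add_sub_cancel_left] at hj
      rcases hkk : j - x.length with _ | k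
      · rw [hkk, List.drop_zero] at hj
        exact Or.inl ((List.cons_prefix_cons.mp hj).2)
      · rw [hkk] at hj
        simp only [List.drop_succ_cons] at hj
        exact Or.inr ⟨k, hj⟩
  · rintro (h | ⟨j, hj⟩)
    · refine ⟨x.length, ?_⟩
      rw [List.drop_left]
      exact List.cons_prefix_cons.mpr ⟨rfl, h⟩
    · refine ⟨x.length + (j + 1), ?_⟩
      rw [List.drop_append, List.drop_eq_nil_iff.mpr (by omega), List.nil_append,
        Nat.add_sub_cancel_left]
      simpa using hj

-- header detection: prefix-or-marker search in the join equals the per-line scan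
lemma pv_header (p : List Char) (hp : p ≠ []) (hpn : '\n' ∉ p) :
    ∀ (L : List (List Char)), (∀ l ∈ L, '\n' ∉ l) →
    (PySem.Chars.startswith (PySem.Chars.join ['\n'] L) p ||
      PySem.Chars.isIn ('\n' :: p) (PySem.Chars.join ['\n'] L)) =
      L.any (fun l => PySem.Chars.startswith l p) := by
  intro L
  induction L with
  | nil =>
    intro _
    rw [PySem.Chars.join_nil]
    have h1 : PySem.Chars.startswith [] p = false := by
      rcases p with _ | ⟨a, q⟩
      · exact absurd rfl hp
      · rfl
    have h2 : PySem.Chars.isIn ('\n' :: p) [] = false := by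
      rw [PySem.Chars.isIn_eq_false_iff, List.infix_nil]
      simp
    rw [h1, h2]
    simp
  | cons x t ih =>
    intro hL
    have hx : '\n' ∉ x := hL x (by simp)
    cases t with
    | nil =>
      rw [PySem.Chars.join_singleton]
      have h2 : PySem.Chars.isIn ('\n' :: p) x = false := by
        rw [PySem.Chars.isIn_eq_false_iff]
        intro hinf
        exact hx (hinf.sublist.mem (by simp))
      rw [h2]
      simp
    | cons y t' =>
      have hJ : PySem.Chars.join ['\n'] (x :: y :: t') =
          x ++ '\n' :: PySem.Chars.join ['\n'] (y :: t') := by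
        rw [PySem.Chars.join_cons_cons, List.append_assoc]
        rfl
      rw [hJ, Bool.eq_iff_iff]
      simp only [Bool.or_eq_true, List.any_cons, PySem.Chars.startswith_iff,
        ← PySem.Chars.exists_prefix_drop_iff_isIn]
      rw [pv_prefix_append_nl x _ p hx hpn,
        pv_infix_append_nl x _ p hx]
      have hih := ih (fun l hl => hL l (by simp [hl]))
      rw [Bool.eq_iff_iff] at hih
      simp only [Bool.or_eq_true, List.any_cons, PySem.Chars.startswith_iff,
        ← PySem.Chars.exists_prefix_drop_iff_isIn] at hih
      rw [← hih]

-- Str-level header lemma over the lowered joined text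
lemma pv_header_str (L : List String) (hL : ∀ l ∈ L, '\n' ∉ l.toList)
    (pS nS : String) (hp : pS.toList ≠ []) (hpn : '\n' ∉ pS.toList)
    (hn : nS.toList = '\n' :: pS.toList) :
    (PySem.Str.startswith (PySem.Str.lower (PySem.Str.join "\n" L)) pS ||
      PySem.Str.isIn nS (PySem.Str.lower (PySem.Str.join "\n" L))) =
      L.any (fun line => PySem.Str.startswith (PySem.Str.lower line) pS) := by
  simp only [PySem.Str.startswith, PySem.Str.isIn, PySem.Str.toList_lower,
    PySem.Str.toList_join, hn]
  rw [show (String.toList "\n") = ['\n'] from rfl, pv_lower_join_chars,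
    pv_header pS.toList hp hpn _ ?_]
  · rw [List.any_map, List.any_map]
    rfl
  · intro l' hl'
    simp only [List.mem_map] at hl'
    obtain ⟨lc, ⟨l, hlmem, rfl⟩, rfl⟩ := hl'
    exact pv_lower_noNL _ (hL l hlmem)

lemma pv_bool4 (i a b c d : Bool) :
    (if !(a || b || c || d) then false else i) = (i && ((a || c) || (b || d))) := by
  cases i <;> cases a <;> cases b <;> cases c <;> cases d <;> rfl

-- every raw line of splitlines is break-free
lemma pv_break_lines (raw : String) :
    ∀ l ∈ PySem.Str.splitlines raw, ∀ c ∈ l.toList, pvBreak c = false := by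
  intro l hl c hc
  obtain ⟨piece, hpiece, rfl⟩ :
      ∃ piece ∈ PySem.Chars.splitlines raw.toList, String.ofList piece = l := by
    simpa [show PySem.Str.splitlines raw
        = List.map String.ofList (PySem.Chars.splitlines raw.toList) from rfl] using hl
  exact pv_mem_splitlines raw.toList piece hpiece c
    (by simpa [String.toList_ofList] using hc)

-- B's word-built line list IS A's normalized line list
lemma pv_lists_eq (raw : String) :
    (((PySem.Str.splitlines raw).map PySem.Str.split₀).filter
        (fun ws => !ws.isEmpty)).map (fun ws => PySem.Str.join " " ws)
    = ((PySem.Str.splitlines raw).filter (fun l => PySem.Str.strip l != "")).map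
        pvNormalizeQuoteText := by
  rw [List.filter_map, List.map_map]
  have hpred : ((fun ws => !List.isEmpty ws) ∘ PySem.Str.split₀)
      = (fun l => PySem.Str.strip l != "") := by
    funext l
    simp only [Function.comp]
    rw [pv_filter_pred]
  rw [hpred]
  apply List.map_congr_left
  intro l hl
  simp only [Function.comp]
  exact (pv_normalize_eq l (pv_break_lines raw l (List.mem_filter.mp hl).1)).symm

-- the normalized lines contain no newline
lemma pv_word_lines_noNL (raw : String) :
    ∀ l ∈ ((PySem.Str.splitlines raw).filter (fun l => PySem.Str.strip l != "")).map
        pvNormalizeQuoteText, '\n' ∉ l.toList := by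
  intro l hlmem
  obtain ⟨l0, hl0, rfl⟩ := List.mem_map.mp hlmem
  rw [pv_normalize_eq l0 (pv_break_lines raw l0 (List.mem_filter.mp hl0).1)]
  intro hcl
  rw [PySem.Str.toList_join] at hcl
  have hwords : List.map String.toList (PySem.Str.split₀ l0)
      = PySem.Chars.split₀ l0.toList := by
    rw [show PySem.Str.split₀ l0
        = List.map String.ofList (PySem.Chars.split₀ l0.toList) from rfl, List.map_map,
      show (String.toList ∘ String.ofList) = id from funext (fun x => String.toList_ofList),
      List.map_id]
  rw [hwords, show (String.toList " ") = [' '] from rfl] at hcl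
  rcases pv_mem_join ' ' _ '\n' hcl with h | ⟨w, hw, hcw⟩
  · exact absurd h (by decide)
  · exact absurd ((pv_mem_split0 l0.toList w hw).2 '\n' hcw) (by decide)

-- ===== VERDICT (by name: the statement is the Claim_ definition above) =====
theorem candidate_supports_intro_milestone_spec : Claim_equal_candidate_supports_intro_milestone := by
  intro candidate _
  unfold Spec_candidate_supports_intro_milestone
  simp only [candidate_supports_intro_milestone, candidate_supports_intro_milestone_alt,
    pvGetCandidateLines]
  rw [pv_lists_eq]
  rw [pv_bool4,
    ← pv_header_str _ (pv_word_lines_noNL _) "date:" "\ndate:"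
        (by decide) (by decide) (by decide),
    ← pv_header_str _ (pv_word_lines_noNL _) "subject:" "\nsubject:"
        (by decide) (by decide) (by decide)]
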